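-- pv_equiv track=rewrite | github.com/Colin-the/multiset | parentTree.py | compute_subtree_sizes
-- ===== SOURCE A (Python) =====
-- from typing import List, Tuple, Dict
--
-- def compute_subtree_sizes(tree: Dict[Tuple[int, ...], List[Tuple[int, ...]]],
--                           root: Tuple[int, ...]) -> Dict[Tuple[int, ...], int]:
--     """Recursively count number of leaves under each node."""
--     sizes = {}
--     def dfs(u):
--         children = tree.get(u, [])
--         if not children:
--             sizes[u] = 1
--         else:
--             sizes[u] = sum(dfs(v) for v in children)
--         return sizes[u]
--     dfs(root)
--     return sizes
-- ===== SOURCE B (Python) =====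
-- def compute_subtree_sizes(tree, root):
--     """Iteratively count number of leaves under each node (explicit-stack post-order)."""
--     sizes = {}
--     vals = []                      # value stack: leaf counts of finished subtrees
--     stack = [(root, False)]
--     while stack:
--         u, done = stack.pop()
--         children = tree.get(u, [])
--         if done:
--             cut = len(vals) - len(children)
--             s = sum(vals[cut:])
--             del vals[cut:]
--             sizes[u] = s
--             vals.append(s)
--         elif not children:
--             sizes[u] = 1
--             vals.append(1)
--         else:
--             stack.append((u, True))
--             for v in reversed(children):
--                 stack.append((v, False))
--     return sizes
-- ===== Notes on version B (the rewrite author's own statement) =====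
-- stated objective: alternative
-- what changed: A's recursive DFS is replaced by an iterative explicit-stack post-order evaluator: visit/finish frames on one stack plus a value stack of finished subtree counts, so no recursion is used.
import Mathlib
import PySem

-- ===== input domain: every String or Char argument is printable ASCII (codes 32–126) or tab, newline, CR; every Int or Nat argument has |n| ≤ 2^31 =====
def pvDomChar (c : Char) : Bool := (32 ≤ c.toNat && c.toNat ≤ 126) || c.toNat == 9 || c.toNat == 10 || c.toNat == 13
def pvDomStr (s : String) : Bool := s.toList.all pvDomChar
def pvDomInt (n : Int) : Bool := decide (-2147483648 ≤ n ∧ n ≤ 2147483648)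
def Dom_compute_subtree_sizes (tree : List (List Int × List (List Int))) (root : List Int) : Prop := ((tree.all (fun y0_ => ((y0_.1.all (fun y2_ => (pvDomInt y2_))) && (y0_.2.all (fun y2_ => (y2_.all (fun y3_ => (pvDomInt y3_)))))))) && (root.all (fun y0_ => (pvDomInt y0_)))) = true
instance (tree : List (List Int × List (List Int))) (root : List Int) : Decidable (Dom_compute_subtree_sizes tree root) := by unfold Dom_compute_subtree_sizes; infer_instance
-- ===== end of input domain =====

-- B replaces A's recursive DFS by an iterative explicit-stack post-order evaluator
-- (visit/finish frames plus a value stack) — objective: alternative (no recursion).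

-- tree.get(u, []) — first match in the association list
def pvChildren (tree : List (List Int × List (List Int))) (u : List Int) : List (List Int) :=
  (PySem.Dict.mk tree).getD u []

-- ===== PORT A =====
-- dfs with fuel (Python's recursion diverges on cyclic input; Pre_ guarantees the fuel suffices)
mutual
def pvDfsA (tree : List (List Int × List (List Int))) :
    Nat → List Int → PySem.Dict (List Int) Int → Option (PySem.Dict (List Int) Int × Int)
  | 0, _, _ => none
  | d + 1, u, sizes =>
    let cs := pvChildren tree u
    if cs.isEmpty then some (sizes.insert u 1, 1)
    else
      match pvDfsAList tree d cs sizes 0 with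
      | none => none
      | some (s, tot) => some (s.insert u tot, tot)
  termination_by d _ _ => (d, 0)
def pvDfsAList (tree : List (List Int × List (List Int))) :
    Nat → List (List Int) → PySem.Dict (List Int) Int → Int → Option (PySem.Dict (List Int) Int × Int)
  | _, [], s, acc => some (s, acc)
  | d, v :: vs, s, acc =>
    match pvDfsA tree d v s with
    | none => none
    | some (s', r) => pvDfsAList tree d vs s' (acc + r)
  termination_by d vs _ _ => (d, vs.length + 1)
end

def compute_subtree_sizes (tree : List (List Int × List (List Int))) (root : List Int) : List (List Int × Int) :=
  match pvDfsA tree (tree.length + 1) root PySem.Dict.empty with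
  | some (s, _) => s.items
  | none => []

-- ===== PORT B =====
-- frame-count fuel for the stack machine (exact number of loop iterations on terminating input)
mutual
def pvFramesB (tree : List (List Int × List (List Int))) : Nat → List Int → Nat
  | 0, _ => 0
  | d + 1, u =>
    let cs := pvChildren tree u
    if cs.isEmpty then 1 else 2 + pvFramesBList tree d cs
  termination_by d _ => (d, 0)
def pvFramesBList (tree : List (List Int × List (List Int))) : Nat → List (List Int) → Nat
  | _, [] => 0
  | d, v :: vs => pvFramesB tree d v + pvFramesBList tree d vs
  termination_by d vs => (d, vs.length + 1)
end

-- the while loop of Source B: stack of (node, done) frames, value stack `vals`, dict `sizes`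
def pvLoopB (tree : List (List Int × List (List Int))) :
    Nat → List (List Int × Bool) → List Int → PySem.Dict (List Int) Int →
    Option (PySem.Dict (List Int) Int)
  | 0, _, _, _ => none
  | _ + 1, [], _, sizes => some sizes
  | f + 1, (u, done) :: stack, vals, sizes =>
    let cs := pvChildren tree u
    if done then
      let cut := vals.length - cs.length
      let s := (vals.drop cut).foldl (· + ·) 0
      pvLoopB tree f stack (vals.take cut ++ [s]) (sizes.insert u s)
    else if cs.isEmpty then
      pvLoopB tree f stack (vals ++ [1]) (sizes.insert u 1)
    else
      pvLoopB tree f (cs.reverse.foldl (fun st v => (v, false) :: st) ((u, true) :: stack)) vals sizes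

def compute_subtree_sizes_alt (tree : List (List Int × List (List Int))) (root : List Int) : List (List Int × Int) :=
  match pvLoopB tree (pvFramesB tree (tree.length + 1) root + 1) [(root, false)] [] PySem.Dict.empty with
  | some s => s.items
  | none => []

-- ===== PRECONDITION & SPEC =====
def pvExpand (tree : List (List Int × List (List Int))) (us : List (List Int)) : List (List Int) :=
  us.flatMap (pvChildren tree)

-- Pre_: the (tree.length+1)-fold child-expansion of {root} is empty — i.e. no chain of
-- child links of that length leaves root, which holds exactly when no cycle is reachable
-- from root (a longer chain must repeat a key). On excluded inputs Python A recurses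
-- forever (RecursionError) and returns no value.
def Pre_compute_subtree_sizes (tree : List (List Int × List (List Int))) (root : List Int) : Prop :=
  (pvExpand tree)^[tree.length + 1] [root] = []
instance (tree : List (List Int × List (List Int))) (root : List Int) : Decidable (Pre_compute_subtree_sizes tree root) := by unfold Pre_compute_subtree_sizes; infer_instance

def pvWitness_compute_subtree_sizes : (List (List Int × List (List Int))) × List Int :=
  ([([0], [[1], [2]])], [0])

def Spec_compute_subtree_sizes (tree : List (List Int × List (List Int))) (root : List Int) (out : List (List Int × Int)) : Prop := out = compute_subtree_sizes_alt tree root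
instance (tree : List (List Int × List (List Int))) (root : List Int) (out : List (List Int × Int)) : Decidable (Spec_compute_subtree_sizes tree root out) := by unfold Spec_compute_subtree_sizes; infer_instance

-- ===== CLAIM (what is proved, stated in full; the proofs are below) =====
def Claim_equal_compute_subtree_sizes : Prop := ∀ (tree : List (List Int × List (List Int))) (root : List Int), Dom_compute_subtree_sizes tree root → Pre_compute_subtree_sizes tree root → Spec_compute_subtree_sizes tree root (compute_subtree_sizes tree root)

-- ===== LEMMAS AND PROOFS =====

-- fuel sufficiency for A's dfs under Pre_
theorem pvDfsAList_isSome (tree : List (List Int × List (List Int))) (d : Nat)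
    (cs : List (List Int))
    (h : ∀ v ∈ cs, ∀ s, (pvDfsA tree d v s).isSome) :
    ∀ s acc, (pvDfsAList tree d cs s acc).isSome := by
  induction cs with
  | nil => intro s acc; simp [pvDfsAList]
  | cons v vs ih =>
    intro s acc
    have hv := h v (by simp) s
    rcases Option.isSome_iff_exists.mp hv with ⟨⟨s', r⟩, hv'⟩
    rw [pvDfsAList, hv']
    exact ih (fun w hw s => h w (by simp [hw]) s) s' (acc + r)

theorem pvDfsA_isSome (tree : List (List Int × List (List Int))) :
    ∀ (d : Nat) (us : List (List Int)), (pvExpand tree)^[d] us = [] →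
      ∀ u ∈ us, ∀ sizes, (pvDfsA tree d u sizes).isSome := by
  intro d
  induction d with
  | zero => intro us h u hu; rw [Function.iterate_zero_apply] at h; subst h; simp at hu
  | succ d ih =>
    intro us h u hu sizes
    rw [Function.iterate_succ_apply] at h
    rw [pvDfsA]
    by_cases hcs : (pvChildren tree u).isEmpty
    · simp [hcs]
    · simp only [hcs, Bool.false_eq_true, if_false]
      have hsub : ∀ v ∈ pvChildren tree u, ∀ s, (pvDfsA tree d v s).isSome := by
        intro v hv s
        exact ih (pvExpand tree us) h v (List.mem_flatMap.mpr ⟨u, hu, hv⟩) s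
      rcases Option.isSome_iff_exists.mp (pvDfsAList_isSome tree d _ hsub sizes 0) with ⟨⟨s, tot⟩, hf⟩
      rw [hf]
      simp

-- pushing reversed children one by one = prepending the frames in order
theorem pvPush_eq (cs : List (List Int)) (init : List (List Int × Bool)) :
    cs.reverse.foldl (fun st v => (v, false) :: st) init
      = cs.map (fun v => (v, false)) ++ init := by
  induction cs generalizing init with
  | nil => simp
  | cons c cs ih => simp [List.foldl_append, ih]

-- simulation: the stack machine consumes exactly the frame count of a finished subtree
theorem pvSimList (tree : List (List Int × List (List Int))) (d : Nat)
    (H1 : ∀ u sizes s' r, pvDfsA tree d u sizes = some (s', r) →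
      ∀ f stack vals, pvLoopB tree (pvFramesB tree d u + f) ((u, false) :: stack) vals sizes
        = pvLoopB tree f stack (vals ++ [r]) s') :
    ∀ (cs : List (List Int)) sizes acc s' tot,
      pvDfsAList tree d cs sizes acc = some (s', tot) →
      ∃ rs : List Int, rs.length = cs.length ∧ rs.foldl (· + ·) acc = tot ∧
        ∀ f stack vals,
          pvLoopB tree (pvFramesBList tree d cs + f) (cs.map (fun v => (v, false)) ++ stack) vals sizes
            = pvLoopB tree f stack (vals ++ rs) s' := by
  intro cs
  induction cs with
  | nil =>
    intro sizes acc s' tot h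
    rw [pvDfsAList] at h
    refine ⟨[], rfl, ?_, ?_⟩
    · simpa using (Prod.mk.injEq _ _ _ _ ▸ congrArg (Option.getD · (sizes, acc)) h : _) |>.2 ▸ rfl
    · intro f stack vals
      obtain ⟨h1, h2⟩ := Prod.mk.injEq _ _ _ _ ▸ Option.some.injEq _ _ ▸ h
      subst h1; simp [pvFramesBList]
  | cons v vs ih =>
    intro sizes acc s' tot h
    rw [pvDfsAList] at h
    cases hv : pvDfsA tree d v sizes with
    | none => rw [hv] at h; simp at h
    | some p =>
      obtain ⟨s1, r⟩ := p
      rw [hv] at h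
      rcases ih s1 (acc + r) s' tot h with ⟨rs, hlen, hsum, hrun⟩
      refine ⟨r :: rs, by simp [hlen], by simpa using hsum, ?_⟩
      intro f stack vals
      have step1 := H1 v sizes s1 r hv (pvFramesBList tree d vs + f)
        (vs.map (fun v => (v, false)) ++ stack) vals
      have step2 := hrun f stack (vals ++ [r])
      calc pvLoopB tree (pvFramesBList tree d (v :: vs) + f)
            ((v :: vs).map (fun v => (v, false)) ++ stack) vals sizes
          = pvLoopB tree (pvFramesB tree d v + (pvFramesBList tree d vs + f))
            ((v, false) :: (vs.map (fun v => (v, false)) ++ stack)) vals sizes := by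
            rw [pvFramesBList]; ring_nf; simp [Nat.add_assoc]
        _ = pvLoopB tree (pvFramesBList tree d vs + f)
            (vs.map (fun v => (v, false)) ++ stack) (vals ++ [r]) s1 := step1
        _ = pvLoopB tree f stack ((vals ++ [r]) ++ rs) s' := step2
        _ = pvLoopB tree f stack (vals ++ (r :: rs)) s' := by simp

theorem pvSim (tree : List (List Int × List (List Int))) :
    ∀ (d : Nat) (u : List Int) sizes s' r, pvDfsA tree d u sizes = some (s', r) →
      ∀ f stack vals, pvLoopB tree (pvFramesB tree d u + f) ((u, false) :: stack) vals sizes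
        = pvLoopB tree f stack (vals ++ [r]) s' := by
  intro d
  induction d with
  | zero => intro u sizes s' r h; rw [pvDfsA] at h; simp at h
  | succ d ih =>
    intro u sizes s' r h f stack vals
    rw [pvDfsA] at h
    by_cases hcs : (pvChildren tree u).isEmpty
    · simp only [hcs, if_pos] at h
      obtain ⟨h1, h2⟩ := Prod.mk.injEq _ _ _ _ ▸ Option.some.injEq _ _ ▸ h
      have hframes : pvFramesB tree (d + 1) u = 1 := by rw [pvFramesB]; simp [hcs]
      rw [hframes]
      have : (1 : Nat) + f = f + 1 := Nat.add_comm 1 f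
      rw [this, pvLoopB]
      simp only [hcs, Bool.false_eq_true, if_false, if_pos]
      rw [← h1, ← h2]
    · simp only [hcs, Bool.false_eq_true, if_false] at h
      cases hl : pvDfsAList tree d (pvChildren tree u) sizes 0 with
      | none => rw [hl] at h; simp at h
      | some p =>
        obtain ⟨s0, tot⟩ := p
        rw [hl] at h
        obtain ⟨h1, h2⟩ := Prod.mk.injEq _ _ _ _ ▸ Option.some.injEq _ _ ▸ h
        rcases pvSimList tree d ih (pvChildren tree u) sizes 0 s0 tot hl with ⟨rs, hlen, hsum, hrun⟩
        have hframes : pvFramesB tree (d + 1) u = 2 + pvFramesBList tree d (pvChildren tree u) := by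
          rw [pvFramesB]; simp [hcs]
        rw [hframes]
        have e1 : 2 + pvFramesBList tree d (pvChildren tree u) + f
            = (pvFramesBList tree d (pvChildren tree u) + (f + 1)) + 1 := by omega
        rw [e1, pvLoopB]
        simp only [hcs, Bool.false_eq_true, if_false]
        rw [pvPush_eq]
        rw [hrun (f + 1) ((u, true) :: stack) vals]
        rw [pvLoopB]
        simp only [if_pos]
        have hcut : (vals ++ rs).length - (pvChildren tree u).length = vals.length := by
          simp [hlen]
        rw [hcut]
        rw [List.drop_left, List.take_left]
        simp [← h1, ← h2, hsum]

-- ===== VERDICT (by name: the statement is the Claim_ definition above) =====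
theorem compute_subtree_sizes_spec : Claim_equal_compute_subtree_sizes := by
  intro tree root _hdom hpre
  unfold Spec_compute_subtree_sizes
  have hsome := pvDfsA_isSome tree (tree.length + 1) [root] hpre root (by simp) PySem.Dict.empty
  rcases Option.isSome_iff_exists.mp hsome with ⟨⟨s, r⟩, h⟩
  have hB := pvSim tree (tree.length + 1) root PySem.Dict.empty s r h 1 [] []
  unfold compute_subtree_sizes compute_subtree_sizes_alt
  rw [h, hB]
  rw [pvLoopB]
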